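-- pv_equiv track=rewrite | github.com/snopf/snopf | src/host/pc/password_generator.py | check_inclusion_rules
-- ===== SOURCE A (Python) =====
-- PW_RULE_GROUP_SUM = 0xf
--
-- PW_RULE_INCLUDE_LOWERCASE = 1 << 0
--
-- PW_RULE_INCLUDE_UPPERCASE = 1 << 1
--
-- PW_RULE_INCLUDE_DIGIT = 1 << 2
--
-- PW_RULE_INCLUDE_SPECIAL = 1 << 3
--
-- PW_GROUP_BOUND_LOWERCASE = 18
--
-- PW_GROUP_BOUND_UPPERCASE = 36
--
-- PW_GROUP_BOUND_DIGIT = 46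
--
-- def check_inclusion_rules(mapped_password, rules):
--     '''
--     Checks whether the generated password fulfills the rules given in rules.
--
--     Parameters
--     ----------
--     mapped_password : list
--         Mapped password
--     rules : int
--         Integer defining rules for the password. The first four bits define
--         which integers have to be included in the raw password
--
--     Returns
--     -------
--     True if the raw password adheres to the rules, else False
--     '''
--     for index in mapped_password:
--         if index < PW_GROUP_BOUND_LOWERCASE:
--             rules &= ~(PW_RULE_INCLUDE_LOWERCASE)
--         elif index < PW_GROUP_BOUND_UPPERCASE:
--             rules &= ~(PW_RULE_INCLUDE_UPPERCASE)
--         elif index < PW_GROUP_BOUND_DIGIT: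
--             rules &= ~(PW_RULE_INCLUDE_DIGIT)
--         else:
--             rules &= ~(PW_RULE_INCLUDE_SPECIAL)
--
--         if not (rules & PW_RULE_GROUP_SUM):
--             return True
--
--     return False
-- ===== SOURCE B (Python) =====
-- PW_RULE_GROUP_SUM = 0xf
--
-- PW_RULE_INCLUDE_LOWERCASE = 1 << 0
--
-- PW_RULE_INCLUDE_UPPERCASE = 1 << 1
--
-- PW_RULE_INCLUDE_DIGIT = 1 << 2
--
-- PW_RULE_INCLUDE_SPECIAL = 1 << 3
--
-- PW_GROUP_BOUND_LOWERCASE = 18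
--
-- PW_GROUP_BOUND_UPPERCASE = 36
--
-- PW_GROUP_BOUND_DIGIT = 46
--
--
-- def check_inclusion_rules(mapped_password, rules):
--     '''Group-wise check: each required character group must occur somewhere.'''
--     if not mapped_password:
--         return False
--     required = rules & PW_RULE_GROUP_SUM
--     if required & PW_RULE_INCLUDE_LOWERCASE and \
--             not any(i < PW_GROUP_BOUND_LOWERCASE for i in mapped_password):
--         return False
--     if required & PW_RULE_INCLUDE_UPPERCASE and \
--             not any(PW_GROUP_BOUND_LOWERCASE <= i < PW_GROUP_BOUND_UPPERCASE
--                     for i in mapped_password):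
--         return False
--     if required & PW_RULE_INCLUDE_DIGIT and \
--             not any(PW_GROUP_BOUND_UPPERCASE <= i < PW_GROUP_BOUND_DIGIT
--                     for i in mapped_password):
--         return False
--     if required & PW_RULE_INCLUDE_SPECIAL and \
--             not any(i >= PW_GROUP_BOUND_DIGIT for i in mapped_password):
--         return False
--     return True
-- ===== Notes on version B (the rewrite author's own statement) =====
-- stated objective: alternative
-- what changed: Replaces A's single stateful pass that clears rule bits with early exit by an empty-list guard plus up to four independent any()-scans, one per required character group.
import Mathlib
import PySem

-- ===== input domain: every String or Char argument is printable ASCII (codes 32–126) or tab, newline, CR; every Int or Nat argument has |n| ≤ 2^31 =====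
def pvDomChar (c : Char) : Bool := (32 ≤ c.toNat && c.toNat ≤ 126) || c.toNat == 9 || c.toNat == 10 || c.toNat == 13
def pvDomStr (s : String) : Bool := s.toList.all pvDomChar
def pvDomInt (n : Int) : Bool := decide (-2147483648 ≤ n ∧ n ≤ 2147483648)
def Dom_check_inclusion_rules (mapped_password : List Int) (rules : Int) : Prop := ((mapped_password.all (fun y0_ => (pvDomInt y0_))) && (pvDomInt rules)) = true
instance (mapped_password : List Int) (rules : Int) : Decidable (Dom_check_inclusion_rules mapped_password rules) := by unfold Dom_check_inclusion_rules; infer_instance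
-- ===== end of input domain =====

-- ===== PORT A =====
-- single clearing pass: each password index clears its group's rule bit, early exit once no bits remain
def pvChkLoop_check_inclusion_rules : List Int → Int → Bool
  | [], _ => false
  | index :: rest, rules =>
    let rules' :=
      if index < 18 then PySem.Int.band rules (Int.not 1)
      else if index < 36 then PySem.Int.band rules (Int.not 2)
      else if index < 46 then PySem.Int.band rules (Int.not 4)
      else PySem.Int.band rules (Int.not 8)
    if PySem.Int.band rules' 15 = 0 then true
    else pvChkLoop_check_inclusion_rules rest rules'

def check_inclusion_rules (mapped_password : List Int) (rules : Int) : Bool :=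
  pvChkLoop_check_inclusion_rules mapped_password rules

-- ===== PORT B =====
-- group-wise check: each required group must occur somewhere in the password
def check_inclusion_rules_alt (mapped_password : List Int) (rules : Int) : Bool :=
  if mapped_password.isEmpty then false
  else
    let required := PySem.Int.band rules 15
    if (PySem.Int.band required 1 != 0) &&
        !(mapped_password.any fun i => decide (i < 18)) then false
    else if (PySem.Int.band required 2 != 0) &&
        !(mapped_password.any fun i => decide (18 ≤ i) && decide (i < 36)) then false
    else if (PySem.Int.band required 4 != 0) &&
        !(mapped_password.any fun i => decide (36 ≤ i) && decide (i < 46)) then false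
    else if (PySem.Int.band required 8 != 0) &&
        !(mapped_password.any fun i => decide (46 ≤ i)) then false
    else true

-- ===== PRECONDITION & SPEC =====
def Spec_check_inclusion_rules (mapped_password : List Int) (rules : Int) (out : Bool) : Prop := out = check_inclusion_rules_alt mapped_password rules
instance (mapped_password : List Int) (rules : Int) (out : Bool) : Decidable (Spec_check_inclusion_rules mapped_password rules out) := by unfold Spec_check_inclusion_rules; infer_instance

-- ===== CLAIM (what is proved, stated in full; the proofs are below) =====
def Claim_equal_check_inclusion_rules : Prop := ∀ (mapped_password : List Int) (rules : Int), Dom_check_inclusion_rules mapped_password rules → Spec_check_inclusion_rules mapped_password rules (check_inclusion_rules mapped_password rules)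

-- ===== LEMMAS AND PROOFS =====

def pvLow (r : Int) : Nat := (r % 16).toNat

theorem pvLow_lt (r : Int) : pvLow r < 16 := by unfold pvLow; omega

theorem pv_nibA (n m : Nat) (hm : m < 16) : n &&& m = (n % 16) &&& m := by
  apply Nat.eq_of_testBit_eq; intro i
  simp only [Nat.testBit_and]
  by_cases hi : i < 4
  · have : (16:Nat) = 2^4 := by norm_num
    rw [this, Nat.testBit_mod_two_pow]; simp [hi]
  · have hmb : m.testBit i = false :=
      Nat.testBit_lt_two_pow (lt_of_lt_of_le hm (by
        calc (16:Nat) = 2^4 := by norm_num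
        _ ≤ 2^i := Nat.pow_le_pow_right (by norm_num) (by omega)))
    simp [hmb]

theorem pv_nibO (n c : Nat) (hc : c < 16) : (n ||| c) % 16 = (n % 16) ||| c := by
  apply Nat.eq_of_testBit_eq; intro i
  have h16 : (16:Nat) = 2^4 := by norm_num
  by_cases hi : i < 4
  · rw [h16, Nat.testBit_mod_two_pow, Nat.testBit_or, Nat.testBit_or,
        Nat.testBit_mod_two_pow]; simp [hi]
  · have hcb : c.testBit i = false :=
      Nat.testBit_lt_two_pow (lt_of_lt_of_le hc (by
        rw [h16]; exact Nat.pow_le_pow_right (by norm_num) (by omega)))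
    rw [h16, Nat.testBit_mod_two_pow, Nat.testBit_or, Nat.testBit_or,
        Nat.testBit_mod_two_pow]
    simp [hcb, hi]

-- band with a small nonnegative mask only sees the low nibble
theorem pv_band_mask (r : Int) (m : Nat) (hm : m < 16) :
    PySem.Int.band r (m : Int) = ((pvLow r &&& m : Nat) : Int) := by
  unfold PySem.Int.band pvLow
  by_cases hr : 0 ≤ r
  · rw [if_pos hr, if_pos (by positivity : (0:Int) ≤ (m:Int))]
    have h1 : (m:Int).toNat = m := by omega
    have h2 : (r % 16).toNat = r.toNat % 16 := by omega
    rw [h1, h2, ← pv_nibA _ _ hm]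
  · rw [if_neg hr, if_pos (by positivity : (0:Int) ≤ (m:Int))]
    have h1 : (m:Int).toNat = m := by omega
    set k := (-r).toNat - 1 with hk
    have hr' : r = -(k:Int) - 1 := by omega
    have h2 : (r % 16).toNat = 15 - k % 16 := by omega
    rw [h1, h2]
    have hk2 : (-r - 1).toNat = k := by omega
    have h3 : m &&& (-r - 1).toNat = (k % 16) &&& m := by
      rw [hk2, Nat.and_comm]; exact pv_nibA k m hm
    rw [h3]
    have hfin : ∀ k' < 16, ∀ m' < 16, m' - (k' &&& m') = (15 - k') &&& m' := by decide
    rw [hfin (k % 16) (by omega) m hm]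

-- band with the complement of a small mask: the low nibble is masked, high bits irrelevant
theorem pv_band_not (r : Int) (c : Nat) (hc : c < 16) :
    pvLow (PySem.Int.band r (Int.not (c : Int))) = pvLow r &&& (15 - c) := by
  have hnot : Int.not (c : Int) = -(c:Int) - 1 := by
    simp [Int.not]; omega
  unfold PySem.Int.band
  rw [hnot]
  by_cases hr : 0 ≤ r
  · rw [if_pos hr, if_neg (by omega)]
    have h1 : (-(-(c:Int) - 1) - 1).toNat = c := by omega
    rw [h1]
    set n := r.toNat with hn
    have e1 : n &&& c = (n % 16) &&& c := pv_nibA n c hc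
    have e2 : (n % 16) &&& c ≤ n % 16 := Nat.and_le_left
    have hfin : ∀ a < 16, ∀ c' < 16, a &&& (15 - c') = a - (a &&& c') := by decide
    unfold pvLow
    have h2 : (r % 16).toNat = n % 16 := by omega
    rw [h2, hfin (n % 16) (by omega) c hc, e1]
    omega
  · rw [if_neg hr, if_neg (by omega)]
    set k := (-r - 1).toNat with hk
    have h1 : (-(-(c:Int) - 1) - 1).toNat = c := by omega
    rw [h1]
    unfold pvLow
    have h2 : (r % 16).toNat = 15 - k % 16 := by omega
    have h3 : ((-((k ||| c : Nat) : Int) - 1) % 16).toNat = 15 - (k ||| c) % 16 := by omega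
    rw [h2, h3, pv_nibO k c hc]
    have hfin : ∀ k' < 16, ∀ c' < 16, 15 - (k' ||| c') = (15 - k') &&& (15 - c') := by decide
    exact hfin (k % 16) (by omega) c hc

-- nibble-level abstraction of A's loop
def pvNib : List Int → Nat → Bool
  | [], _ => false
  | index :: rest, s =>
    let s' := if index < 18 then s &&& 14
      else if index < 36 then s &&& 13
      else if index < 46 then s &&& 11
      else s &&& 7
    if s' = 0 then true else pvNib rest s'

theorem pv_chk_eq_nib (mp : List Int) (r : Int) :
    pvChkLoop_check_inclusion_rules mp r = pvNib mp (pvLow r) := by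
  induction mp generalizing r with
  | nil => rfl
  | cons i rest ih =>
    rw [pvChkLoop_check_inclusion_rules, pvNib]
    have key : ∀ c : Nat, c < 16 →
        (if PySem.Int.band (PySem.Int.band r (Int.not (c:Int))) 15 = 0 then true
          else pvChkLoop_check_inclusion_rules rest (PySem.Int.band r (Int.not (c:Int))))
        = (if pvLow r &&& (15 - c) = 0 then true else pvNib rest (pvLow r &&& (15 - c))) := by
      intro c hc
      have e := pv_band_mask (PySem.Int.band r (Int.not (c:Int))) 15 (by norm_num)
      simp only [Nat.cast_ofNat] at e
      rw [ih, e, pv_band_not _ _ hc]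
      have hid : (pvLow r &&& (15 - c)) &&& 15 = pvLow r &&& (15 - c) := by
        have h1 : pvLow r &&& (15 - c) < 16 :=
          lt_of_le_of_lt Nat.and_le_left (pvLow_lt r)
        have : ∀ a < 16, a &&& 15 = a := by decide
        exact this _ h1
      rw [hid]
      simp
    by_cases h1 : i < 18
    · simpa [h1] using key 1 (by norm_num)
    · by_cases h2 : i < 36
      · simpa [h1, h2] using key 2 (by norm_num)
      · by_cases h3 : i < 46
        · simpa [h1, h2, h3] using key 4 (by norm_num)
        · simpa [h1, h2, h3] using key 8 (by norm_num)

-- B's value expressed over the nibble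
def pvBf (mp : List Int) (s : Nat) : Bool :=
  !mp.isEmpty &&
  ((s &&& 1 == 0) || mp.any fun i => decide (i < 18)) &&
  ((s &&& 2 == 0) || mp.any fun i => decide (18 ≤ i) && decide (i < 36)) &&
  ((s &&& 4 == 0) || mp.any fun i => decide (36 ≤ i) && decide (i < 46)) &&
  ((s &&& 8 == 0) || mp.any fun i => decide (46 ≤ i))

set_option maxHeartbeats 1000000 in
theorem pv_step1 (s : Nat) (hs : s < 16) (i : Int) (rest : List Int) (h1 : i < 18) :
    (if s &&& 14 = 0 then true else pvBf rest (s &&& 14)) = pvBf (i :: rest) s := by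
  have hd1 : decide (i < 18) = true := by simpa using h1
  have hd2 : decide (18 ≤ i) = false := by simp; omega
  have hd3 : decide (36 ≤ i) = false := by simp; omega
  have hd4 : decide (46 ≤ i) = false := by simp; omega
  cases rest <;> interval_cases s <;>
    simp [pvBf, List.any_cons, hd1, hd2, hd3, hd4]

set_option maxHeartbeats 1000000 in
theorem pv_step2 (s : Nat) (hs : s < 16) (i : Int) (rest : List Int)
    (h1 : 18 ≤ i) (h2 : i < 36) :
    (if s &&& 13 = 0 then true else pvBf rest (s &&& 13)) = pvBf (i :: rest) s := by
  have hd1 : decide (i < 18) = false := by simp; omega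
  have hd2 : decide (18 ≤ i) = true := by simpa using h1
  have hd2' : decide (i < 36) = true := by simpa using h2
  have hd3 : decide (36 ≤ i) = false := by simp; omega
  have hd4 : decide (46 ≤ i) = false := by simp; omega
  cases rest <;> interval_cases s <;>
    simp [pvBf, List.any_cons, hd1, hd2, hd2', hd3, hd4]

set_option maxHeartbeats 1000000 in
theorem pv_step3 (s : Nat) (hs : s < 16) (i : Int) (rest : List Int)
    (h2 : 36 ≤ i) (h3 : i < 46) :
    (if s &&& 11 = 0 then true else pvBf rest (s &&& 11)) = pvBf (i :: rest) s := by
  have hd1 : decide (i < 18) = false := by simp; omega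
  have hd2 : decide (18 ≤ i) = true := by simp; omega
  have hd2' : decide (i < 36) = false := by simp; omega
  have hd3 : decide (36 ≤ i) = true := by simpa using h2
  have hd3' : decide (i < 46) = true := by simpa using h3
  have hd4 : decide (46 ≤ i) = false := by simp; omega
  cases rest <;> interval_cases s <;>
    simp [pvBf, List.any_cons, hd1, hd2, hd2', hd3, hd3', hd4]

set_option maxHeartbeats 1000000 in
theorem pv_step4 (s : Nat) (hs : s < 16) (i : Int) (rest : List Int) (h3 : 46 ≤ i) :
    (if s &&& 7 = 0 then true else pvBf rest (s &&& 7)) = pvBf (i :: rest) s := by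
  have hd1 : decide (i < 18) = false := by simp; omega
  have hd2 : decide (18 ≤ i) = true := by simp; omega
  have hd2' : decide (i < 36) = false := by simp; omega
  have hd3 : decide (36 ≤ i) = true := by simp; omega
  have hd3' : decide (i < 46) = false := by simp; omega
  have hd4 : decide (46 ≤ i) = true := by simpa using h3
  cases rest <;> interval_cases s <;>
    simp [pvBf, List.any_cons, hd1, hd2, hd2', hd3, hd3', hd4]

theorem pv_nib_eq_bf (mp : List Int) (s : Nat) (hs : s < 16) :
    pvNib mp s = pvBf mp s := by
  induction mp generalizing s with
  | nil => rfl
  | cons i rest ih =>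
    rw [pvNib]
    have hlt : ∀ m : Nat, s &&& m < 16 := fun m => lt_of_le_of_lt Nat.and_le_left hs
    by_cases h1 : i < 18
    · rw [if_pos h1, ih _ (hlt 14)]
      exact pv_step1 s hs i rest h1
    · by_cases h2 : i < 36
      · rw [if_neg h1, if_pos h2, ih _ (hlt 13)]
        exact pv_step2 s hs i rest (not_lt.mp h1) h2
      · by_cases h3 : i < 46
        · rw [if_neg h1, if_neg h2, if_pos h3, ih _ (hlt 11)]
          exact pv_step3 s hs i rest (not_lt.mp h2) h3
        · rw [if_neg h1, if_neg h2, if_neg h3, ih _ (hlt 7)]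
          exact pv_step4 s hs i rest (not_lt.mp h3)

theorem pv_ifchain (e b1 a1 b2 a2 b3 a3 b4 a4 : Bool) :
    (if e then false
      else if !b1 && !a1 then false
      else if !b2 && !a2 then false
      else if !b3 && !a3 then false
      else if !b4 && !a4 then false
      else true)
    = (!e && (b1 || a1) && (b2 || a2) && (b3 || a3) && (b4 || a4)) := by
  cases e <;> cases b1 <;> cases a1 <;> cases b2 <;> cases a2 <;>
    cases b3 <;> cases a3 <;> cases b4 <;> cases a4 <;> rfl

theorem pv_alt_eq_bf (mp : List Int) (r : Int) :
    check_inclusion_rules_alt mp r = pvBf mp (pvLow r) := by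
  unfold check_inclusion_rules_alt pvBf
  have hreq : PySem.Int.band r 15 = ((pvLow r : Nat) : Int) := by
    have e := pv_band_mask r 15 (by norm_num)
    simp only [Nat.cast_ofNat] at e
    rw [e]
    have : pvLow r &&& 15 = pvLow r := by
      have := pvLow_lt r
      have h : ∀ a < 16, a &&& 15 = a := by decide
      exact h _ this
    rw [this]
  rw [hreq]
  have hsl : pvLow ((pvLow r : Nat) : Int) = pvLow r := by
    have := pvLow_lt r
    unfold pvLow
    omega
  have hb : ∀ c : Nat, c < 16 →
      PySem.Int.band ((pvLow r : Nat) : Int) ((c : Nat) : Int) = ((pvLow r &&& c : Nat) : Int) := by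
    intro c hc
    rw [pv_band_mask _ c hc, hsl]
  have hb1 := hb 1 (by norm_num)
  have hb2 := hb 2 (by norm_num)
  have hb4 := hb 4 (by norm_num)
  have hb8 := hb 8 (by norm_num)
  simp only [Nat.cast_one, Nat.cast_ofNat] at hb1 hb2 hb4 hb8
  simp only [hb1, hb2, hb4, hb8]
  have hc : ∀ n : Nat, ((n : Int) != 0) = !(n == 0) := by
    intro n
    by_cases h : n = 0
    · subst h; rfl
    · have h1 : ((n : Int) != 0) = true := by
        simp [bne]; exact_mod_cast h
      have h2 : (n == 0) = false := by simpa using h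
      rw [h1, h2]; rfl
  simp only [hc]
  exact pv_ifchain mp.isEmpty _ _ _ _ _ _ _ _

-- ===== VERDICT (by name: the statement is the Claim_ definition above) =====
theorem check_inclusion_rules_spec : Claim_equal_check_inclusion_rules := by
  intro mp rules _
  unfold Spec_check_inclusion_rules check_inclusion_rules
  rw [pv_chk_eq_nib, pv_nib_eq_bf _ _ (pvLow_lt rules), pv_alt_eq_bf]
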